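-- pv_equiv track=rewrite | github.com/TanzHasan/Learning | Algorithm-Improvement/Leetcode/Solutions/3104.FindLongestSelfContainedSubstring.py | maxSubstringLength
-- ===== SOURCE A (Python) =====
-- inf = float('inf') # this is done by LC
--
-- def maxSubstringLength(s: str) -> int:
--     offset = ord('a')
--     occurrences = [0]*26
--     pos = [[inf, -inf] for _ in range(26)]
--     for i, letter in enumerate(s):
--         letter_ind = ord(letter) - offset
--         occurrences[letter_ind] += 1
--         pos[letter_ind][0] = min(i, pos[letter_ind][0])
--         pos[letter_ind][1] = max(i, pos[letter_ind][1])
--     prefix = [occurrences]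
--     for i in s:
--         prefix.append(list(prefix[-1]))
--         prefix[-1][ord(i)-offset]-=1
--     ans = -1
--     for i in range(26):
--         for j in range(26):
--             l, h = pos[i][0], pos[j][1]
--             if l > h: continue
--             if l == 0 and h == len(s)-1: continue
--             start = prefix[l]
--             stop = prefix[h+1]
--             diffs = []
--             bad = False
--             for k in range(26):
--                 if start[k] != stop[k]:
--                     if stop[k] != 0:
--                         bad = True
--                         break
--                     diffs.append(k)
--             if bad:
--                 continue
--             for k in diffs:
--                 if start[k] != prefix[0][k]:
--                     bad = True
--                     break
--             if bad:
--                 continue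
--             ans = max(ans, h+1-l)
--     return ans
-- ===== SOURCE B (Python) =====
-- def maxSubstringLength(s: str) -> int:
--     n = len(s)
--     first = [n] * 26
--     last = [-1] * 26
--     for i, c in enumerate(s):
--         k = ord(c) - 97
--         if first[k] == n:
--             first[k] = i
--         last[k] = i
--     ans = -1
--     for a in range(26):
--         for b in range(26):
--             l, h = first[a], last[b]
--             if l > h or (l == 0 and h == n - 1):
--                 continue
--             if all(first[ord(s[j]) - 97] >= l and last[ord(s[j]) - 97] <= h
--                    for j in range(l, h + 1)):
--                 ans = max(ans, h + 1 - l)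
--     return ans
-- ===== Notes on version B (the rewrite author's own statement) =====
-- stated objective: alternative
-- what changed: B replaces A's O(26n) table of suffix-count snapshots and its count-difference diffs/bad check with two 26-entry first/last occurrence arrays and a direct scan of each candidate window checking that every character's whole span lies inside it.
import Mathlib
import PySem

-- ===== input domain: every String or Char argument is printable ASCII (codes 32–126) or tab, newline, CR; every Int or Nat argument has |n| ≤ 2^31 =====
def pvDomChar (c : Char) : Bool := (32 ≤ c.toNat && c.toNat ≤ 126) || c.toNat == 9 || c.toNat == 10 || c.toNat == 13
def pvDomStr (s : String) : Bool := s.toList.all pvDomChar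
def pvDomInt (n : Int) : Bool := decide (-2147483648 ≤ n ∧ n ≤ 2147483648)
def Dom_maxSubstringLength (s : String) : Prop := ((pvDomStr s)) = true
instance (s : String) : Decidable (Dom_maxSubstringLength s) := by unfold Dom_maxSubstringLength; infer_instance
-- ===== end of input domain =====

-- B replaces A's table of suffix-count snapshots and its count-difference check with
-- 26-entry first/last occurrence arrays and a direct scan of each candidate window
-- (objective: alternative; same cost, no per-character row copies).

-- ===== PORT A =====
-- A-side helper: the `for k in range(26): … break` loop accumulating `diffs` and `bad`.
def aDiffs (start stop : List Int) : List Int → List Int × Bool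
  | [] => ([], false)
  | k :: ks =>
    if PySem.List.pyGetD start k 0 ≠ PySem.List.pyGetD stop k 0 then
      if PySem.List.pyGetD stop k 0 ≠ 0 then ([], true)
      else
        let r := aDiffs start stop ks
        (k :: r.1, r.2)
    else aDiffs start stop ks

-- NOTE: Python initialises pos with float('inf')/-inf sentinels; every index i satisfies
-- 0 ≤ i < n, so the Int sentinels (n, -1) produce exactly the same min/max/comparison
-- results on every admitted input (this is the only non-PySem hand-ported construct).
def maxSubstringLength (s : String) : Int :=
  let cs := s.toList
  let n : Int := (cs.length : Int)
  let st := (PySem.List.enumerate cs 0).foldl (fun st ic =>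
      let k : Int := (ic.2.toNat : Int) - 97
      let occ := PySem.List.pySetD st.1 k (PySem.List.pyGetD st.1 k 0 + 1)
      let p := PySem.List.pyGetD st.2 k (0, 0)
      (occ, PySem.List.pySetD st.2 k (min ic.1 p.1, max ic.1 p.2)))
    (List.replicate 26 (0 : Int), List.replicate 26 ((n, -1) : Int × Int))
  let prefixes := cs.foldl (fun pr c =>
      let row := PySem.List.pyGetD pr (-1) []
      pr ++ [PySem.List.pySetD row ((c.toNat : Int) - 97)
               (PySem.List.pyGetD row ((c.toNat : Int) - 97) 0 - 1)])
    [st.1]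
  (PySem.List.pyRange 0 26 1).foldl (fun ans i =>
    (PySem.List.pyRange 0 26 1).foldl (fun ans j =>
      let l := (PySem.List.pyGetD st.2 i ((0 : Int), (0 : Int))).1
      let h := (PySem.List.pyGetD st.2 j ((0 : Int), (0 : Int))).2
      if l > h then ans
      else if l = 0 ∧ h = n - 1 then ans
      else
        let start := PySem.List.pyGetD prefixes l []
        let stop := PySem.List.pyGetD prefixes (h + 1) []
        let db := aDiffs start stop (PySem.List.pyRange 0 26 1)
        if db.2 then ans
        else if db.1.any (fun k =>
            decide (PySem.List.pyGetD start k 0 ≠ PySem.List.pyGetD (PySem.List.pyGetD prefixes 0 []) k 0)) then ans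
        else max ans (h + 1 - l)) ans) (-1)

-- ===== PORT B =====
def maxSubstringLength_alt (s : String) : Int :=
  let cs := s.toList
  let n : Int := (cs.length : Int)
  let fl := (PySem.List.enumerate cs 0).foldl (fun st ic =>
      let k : Int := (ic.2.toNat : Int) - 97
      ((if PySem.List.pyGetD st.1 k 0 = n then PySem.List.pySetD st.1 k ic.1 else st.1),
       PySem.List.pySetD st.2 k ic.1))
    (List.replicate 26 n, List.replicate 26 (-1 : Int))
  (PySem.List.pyRange 0 26 1).foldl (fun ans a =>
    (PySem.List.pyRange 0 26 1).foldl (fun ans b =>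
      let l := PySem.List.pyGetD fl.1 a 0
      let h := PySem.List.pyGetD fl.2 b 0
      if l > h ∨ (l = 0 ∧ h = n - 1) then ans
      else if (PySem.List.pyRange l (h + 1) 1).all (fun j =>
          let k : Int := ((PySem.List.pyGetD cs j ' ').toNat : Int) - 97
          decide (l ≤ PySem.List.pyGetD fl.1 k 0) && decide (PySem.List.pyGetD fl.2 k 0 ≤ h))
        then max ans (h + 1 - l) else ans) ans) (-1)

-- ===== PRECONDITION & SPEC =====
-- Pre_ admits exactly the inputs on which the Python A returns: every character code lies
-- in [71,122], so ord(c)-97 lies in [-26,25], a valid (possibly negative) Python list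
-- index; on any character outside that range both A and B raise IndexError.
def Pre_maxSubstringLength (s : String) : Prop :=
  (s.toList.all (fun c => 71 ≤ c.toNat && c.toNat ≤ 122)) = true
instance (s : String) : Decidable (Pre_maxSubstringLength s) := by unfold Pre_maxSubstringLength; infer_instance
def pvWitness_maxSubstringLength : String := "abcba"

def Spec_maxSubstringLength (s : String) (out : Int) : Prop := out = maxSubstringLength_alt s
instance (s : String) (out : Int) : Decidable (Spec_maxSubstringLength s out) := by unfold Spec_maxSubstringLength; infer_instance

-- ===== CLAIM (what is proved, stated in full; the proofs are below) =====
def Claim_equal_maxSubstringLength : Prop := ∀ (s : String), Dom_maxSubstringLength s → Pre_maxSubstringLength s → Spec_maxSubstringLength s (maxSubstringLength s)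

-- ===== LEMMAS AND PROOFS =====

def pvIdx (c : Char) : Nat := if 97 ≤ c.toNat then c.toNat - 97 else c.toNat - 71
def pvP (k : Nat) : Char → Bool := fun c => pvIdx c == k
def pvOK (c : Char) : Prop := 71 ≤ c.toNat ∧ c.toNat ≤ 122

lemma pvIdx_lt (c : Char) (h : pvOK c) : pvIdx c < 26 := by
  unfold pvIdx pvOK at *; split <;> omega

-- resolution of the Python index ord(c)-97 on a 26-element list
lemma pvGet_resolve {α : Type} (xs : List α) (d : α) (c : Char) (hlen : xs.length = 26)
    (h : pvOK c) : PySem.List.pyGetD xs ((c.toNat : Int) - 97) d = xs.getD (pvIdx c) d := by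
  obtain ⟨h1, h2⟩ := h
  by_cases hc : 97 ≤ c.toNat
  · rw [show ((c.toNat : Int) - 97) = ((c.toNat - 97 : Nat) : Int) by omega,
      PySem.List.pyGetD_natCast]
    unfold pvIdx; rw [if_pos hc]
  · rw [show ((c.toNat : Int) - 97) = -((97 - c.toNat : Nat) : Int) by omega,
      PySem.List.pyGetD_neg_natCast _ _ _ (by omega) (by omega)]
    unfold pvIdx; rw [if_neg hc]
    rw [List.getD_eq_getElem?_getD, List.getElem?_eq_getElem (by omega)]
    simp only [Option.getD_some]
    congr 1
    omega

lemma pvSet_resolve {α : Type} (xs : List α) (v : α) (c : Char) (hlen : xs.length = 26)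
    (h : pvOK c) : PySem.List.pySetD xs ((c.toNat : Int) - 97) v = xs.set (pvIdx c) v := by
  obtain ⟨h1, h2⟩ := h
  by_cases hc : 97 ≤ c.toNat
  · rw [show ((c.toNat : Int) - 97) = ((c.toNat - 97 : Nat) : Int) by omega,
      PySem.List.pySetD_natCast]
    unfold pvIdx; rw [if_pos hc]
  · rw [show ((c.toNat : Int) - 97) = -((97 - c.toNat : Nat) : Int) by omega]
    unfold pvIdx; rw [if_neg hc]
    simp only [PySem.List.pySetD, PySem.List.pySet?, PySem.List.pyIdx?]
    rw [if_neg (by omega), if_pos (by omega)]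
    simp only [Option.map_some, Option.getD_some]
    congr 1
    omega

lemma set_map_range {α : Type} (f : Nat → α) (nn i : Nat) (v : α) (hi : i < nn) :
    ((List.range nn).map f).set i v = (List.range nn).map (fun k => if k = i then v else f k) := by
  apply List.ext_getElem <;> simp
  intro j hj
  rw [List.getElem_set]
  split <;> rename_i hh
  · simp_all
  · rw [if_neg (by omega)]
    simp

lemma getD_map_range' {α : Type} (f : Nat → α) (nn i : Nat) (d : α) (hi : i < nn) :
    ((List.range nn).map f).getD i d = f i := by
  rw [List.getD_eq_getElem?_getD]
  simp [List.getElem?_map, List.getElem?_range hi]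

def pvCnt (cs : List Char) (k : Nat) : Int := (cs.countP (pvP k) : Int)
def pvF (cs : List Char) (k : Nat) : Int := (cs.findIdx (pvP k) : Int)
def pvL (cs : List Char) (k : Nat) : Int := (cs.length : Int) - 1 - (cs.reverse.findIdx (pvP k) : Int)

-- pvF facts
lemma pvF_le {cs : List Char} {k : Nat} {j : Nat} (hj : j < cs.length) (h : pvIdx cs[j] = k) :
    pvF cs k ≤ (j : Int) := by
  unfold pvF
  have : cs.findIdx (pvP k) ≤ j := by
    by_contra hc
    have := List.not_of_lt_findIdx (by omega : j < cs.findIdx (pvP k))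
    simp [pvP] at this
    exact this h
  exact_mod_cast this
lemma pvF_found {cs : List Char} {k : Nat} (h : cs.findIdx (pvP k) < cs.length) :
    pvIdx (cs[cs.findIdx (pvP k)]'h) = k := by
  have := @List.findIdx_getElem _ (pvP k) cs h
  simpa [pvP] using this
lemma pvF_nonneg (cs : List Char) (k : Nat) : 0 ≤ pvF cs k := by unfold pvF; positivity

-- pvL facts
lemma pvL_ge {cs : List Char} {k : Nat} {j : Nat} (hj : j < cs.length) (h : pvIdx cs[j] = k) :
    (j : Int) ≤ pvL cs k := by
  unfold pvL
  have hlen : cs.length - 1 - j < cs.reverse.length := by simp; omega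
  have : cs.reverse.findIdx (pvP k) ≤ cs.length - 1 - j := by
    by_contra hc
    have h2 := List.not_of_lt_findIdx (by omega : cs.length - 1 - j < cs.reverse.findIdx (pvP k))
    rw [List.getElem_reverse] at h2
    have : cs.length - 1 - (cs.length - 1 - j) = j := by omega
    simp [this, pvP, h] at h2
  omega
lemma pvL_found {cs : List Char} {k : Nat} (h : cs.reverse.findIdx (pvP k) < cs.length) :
    0 ≤ pvL cs k ∧ pvL cs k < cs.length ∧ pvIdx (cs[(pvL cs k).toNat]'(by unfold pvL; omega)) = k := by
  have hr : cs.reverse.findIdx (pvP k) < cs.reverse.length := by simpa using h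
  have := @List.findIdx_getElem _ (pvP k) cs.reverse hr
  rw [List.getElem_reverse] at this
  unfold pvL
  refine ⟨by omega, by omega, ?_⟩
  have he : ((cs.length : Int) - 1 - (cs.reverse.findIdx (pvP k) : Int)).toNat
      = cs.length - 1 - cs.reverse.findIdx (pvP k) := by omega
  simp only [he]
  simpa [pvP] using this
lemma pvL_lt_length (cs : List Char) (k : Nat) : pvL cs k < (cs.length : Int) := by
  unfold pvL
  have : (0:Int) ≤ cs.reverse.findIdx (pvP k) := by positivity
  omega
lemma pvL_neg_of_notfound {cs : List Char} {k : Nat} (h : ¬ cs.reverse.findIdx (pvP k) < cs.length) :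
    pvL cs k = -1 := by
  have := @List.findIdx_le_length _ (pvP k) cs.reverse
  simp at this
  unfold pvL; omega

-- count bridges
lemma pvCnt_split (cs : List Char) (k : Nat) {a b : Nat} (hab : a ≤ b) (hb : b ≤ cs.length) :
    pvCnt (cs.drop a) k = (((cs.drop a).take (b - a)).countP (pvP k) : Int) + pvCnt (cs.drop b) k := by
  unfold pvCnt
  have h1 : (cs.drop a).drop (b - a) = cs.drop b := by
    rw [List.drop_drop]; congr 1; omega
  conv_lhs => rw [← List.take_append_drop (b - a) (cs.drop a)]
  rw [List.countP_append, h1]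
  push_cast; ring

lemma pvWin_pos_iff (cs : List Char) (k : Nat) {a b : Nat} (hab : a ≤ b) (hb : b ≤ cs.length) :
    0 < ((cs.drop a).take (b - a)).countP (pvP k) ↔
      ∃ j, a ≤ j ∧ j < b ∧ ∃ h : j < cs.length, pvIdx (cs[j]'h) = k := by
  rw [List.countP_pos_iff]
  constructor
  · rintro ⟨c, hc, hpc⟩
    rw [List.mem_iff_getElem] at hc
    obtain ⟨i, hi, rfl⟩ := hc
    have hi' : i < b - a := by
      have := hi; simp [List.length_take, List.length_drop] at this; omega
    refine ⟨a + i, by omega, by omega, by omega, ?_⟩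
    have : ((cs.drop a).take (b-a))[i]'hi = cs[a+i]'(by omega) := by
      rw [List.getElem_take, List.getElem_drop]
    rw [this] at hpc
    simpa [pvP] using hpc
  · rintro ⟨j, haj, hjb, hj, hk⟩
    refine ⟨cs[j]'hj, ?_, by simp [pvP, hk]⟩
    rw [List.mem_iff_getElem]
    have hlen : j - a < ((cs.drop a).take (b-a)).length := by
      simp [List.length_take, List.length_drop]; omega
    refine ⟨j - a, hlen, ?_⟩
    rw [List.getElem_take, List.getElem_drop]
    congr 1; omega

lemma pvCnt_ne_iff (cs : List Char) (k : Nat) {a b : Nat} (hab : a ≤ b) (hb : b ≤ cs.length) :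
    pvCnt (cs.drop a) k ≠ pvCnt (cs.drop b) k ↔
      ∃ j, a ≤ j ∧ j < b ∧ ∃ h : j < cs.length, pvIdx (cs[j]'h) = k := by
  rw [← pvWin_pos_iff cs k hab hb]
  have := pvCnt_split cs k hab hb
  omega

lemma pvCnt_zero_iff (cs : List Char) (k : Nat) (a : Nat) :
    pvCnt (cs.drop a) k = 0 ↔ ∀ j (h : j < cs.length), a ≤ j → pvIdx (cs[j]'h) ≠ k := by
  unfold pvCnt
  rw [show ((cs.drop a).countP (pvP k) : Int) = 0 ↔ (cs.drop a).countP (pvP k) = 0 by omega,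
    List.countP_eq_zero]
  constructor
  · intro hall j hj haj hk
    have hmem : cs[j]'hj ∈ cs.drop a := by
      rw [List.mem_iff_getElem]
      refine ⟨j - a, by simp [List.length_drop]; omega, ?_⟩
      rw [List.getElem_drop]; congr 1; omega
    have := hall _ hmem
    simp [pvP] at this
    exact this hk
  · intro hall c hc
    rw [List.mem_iff_getElem] at hc
    obtain ⟨i, hi, rfl⟩ := hc
    have hi' : i < cs.length - a := by simpa [List.length_drop] using hi
    have : (cs.drop a)[i]'hi = cs[a+i]'(by omega) := List.getElem_drop
    rw [this]
    simpa [pvP] using hall (a+i) (by omega) (by omega)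

lemma pvCnt_total_iff (cs : List Char) (k : Nat) {a : Nat} (ha : a ≤ cs.length) :
    pvCnt (cs.drop a) k = pvCnt cs k ↔ ∀ j (h : j < cs.length), j < a → pvIdx (cs[j]'h) ≠ k := by
  have hsplit := pvCnt_split cs k (Nat.zero_le a) ha
  simp only [List.drop_zero, Nat.sub_zero] at hsplit
  have hwin := pvWin_pos_iff cs k (Nat.zero_le a) ha
  simp only [List.drop_zero, Nat.sub_zero] at hwin
  constructor
  · intro he j hj hja hk
    have : 0 < (cs.take a).countP (pvP k) := hwin.mpr ⟨j, by omega, by omega, hj, hk⟩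
    omega
  · intro hall
    have hz : (cs.take a).countP (pvP k) = 0 := by
      by_contra hnz
      obtain ⟨j, _, hja, hj, hk⟩ := hwin.mp (by omega)
      exact hall j hj hja hk
    omega

def pvFs (nn : Int) (q : List Char) (k : Nat) : Int :=
  if q.findIdx (pvP k) < q.length then pvF q k else nn

lemma pvCnt_snoc (p : List Char) (c : Char) (k : Nat) :
    pvCnt (p ++ [c]) k = pvCnt p k + (if pvIdx c = k then 1 else 0) := by
  unfold pvCnt
  rw [List.countP_append]
  simp only [List.countP_cons, List.countP_nil, Nat.zero_add]
  have : pvP k c = decide (pvIdx c = k) := by simp [pvP]; constructor <;> (intro; omega)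
  rw [this]
  by_cases h : pvIdx c = k <;> simp [h]

lemma pvFs_snoc_ne (nn : Int) (p : List Char) (c : Char) {k : Nat} (h : pvIdx c ≠ k) :
    pvFs nn (p ++ [c]) k = pvFs nn p k := by
  unfold pvFs pvF
  rw [List.findIdx_append]
  have hone : List.findIdx (pvP k) [c] = 1 := by
    simp only [List.findIdx_cons, List.findIdx_nil]
    have : pvP k c = false := by simp [pvP]; omega
    rw [this]; rfl
  by_cases hf : List.findIdx (pvP k) p < p.length
  · rw [if_pos hf, if_pos (by simp only [List.length_append, List.length_cons, List.length_nil]; omega), if_pos hf]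
  · rw [if_neg hf, if_neg (by simp only [hone, List.length_append, List.length_cons, List.length_nil]; have := @List.findIdx_le_length _ (pvP k) p; omega), if_neg hf]

lemma pvFs_snoc_self (nn : Int) (p : List Char) (c : Char) (hn : (p.length : Int) < nn) :
    pvFs nn (p ++ [c]) (pvIdx c) = min (p.length : Int) (pvFs nn p (pvIdx c)) := by
  unfold pvFs pvF
  rw [List.findIdx_append]
  have hone : List.findIdx (pvP (pvIdx c)) [c] = 0 := by simp [List.findIdx_cons, pvP]
  by_cases hf : List.findIdx (pvP (pvIdx c)) p < p.length
  · rw [if_pos hf, if_pos (by simp only [List.length_append, List.length_cons, List.length_nil]; omega), if_pos hf]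
    have : (List.findIdx (pvP (pvIdx c)) p : Int) < (p.length : Int) := by exact_mod_cast hf
    omega
  · rw [if_neg hf, hone, if_pos (by simp), if_neg hf]
    have := @List.findIdx_le_length _ (pvP (pvIdx c)) p
    have h0 : List.findIdx (pvP (pvIdx c)) p = p.length := by omega
    simp [h0]
    omega

lemma pvL_snoc_ne (p : List Char) (c : Char) {k : Nat} (h : pvIdx c ≠ k) :
    pvL (p ++ [c]) k = pvL p k := by
  unfold pvL
  rw [List.reverse_append]
  simp only [List.reverse_singleton, List.singleton_append, List.findIdx_cons]
  have : pvP k c = false := by simp [pvP, h]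
  rw [this]
  simp
  omega

lemma pvL_snoc_self (p : List Char) (c : Char) :
    pvL (p ++ [c]) (pvIdx c) = (p.length : Int) := by
  unfold pvL
  rw [List.reverse_append]
  simp only [List.reverse_singleton, List.singleton_append, List.findIdx_cons]
  have : pvP (pvIdx c) c = true := by simp [pvP]
  rw [this]
  simp

lemma pvL_le_self (p : List Char) (k : Nat) : pvL p k ≤ (p.length : Int) - 1 := by
  unfold pvL
  have : (0:Int) ≤ (p.reverse.findIdx (pvP k) : Int) := by positivity
  omega

lemma pvFs_full (cs : List Char) (k : Nat) : pvFs (cs.length : Int) cs k = pvF cs k := by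
  unfold pvFs pvF
  by_cases h : cs.findIdx (pvP k) < cs.length
  · rw [if_pos h]
  · rw [if_neg h]
    have := @List.findIdx_le_length _ (pvP k) cs
    have : cs.findIdx (pvP k) = cs.length := by omega
    rw [this]

lemma map_range_const {α : Type} (nn : Nat) (x : α) : (List.range nn).map (fun _ => x) = List.replicate nn x := by
  apply List.ext_getElem <;> simp

lemma passA (cs : List Char) (hOK : ∀ c ∈ cs, pvOK c) (nn : Int) (hnn : (cs.length : Int) ≤ nn) :
    ∀ (t p : List Char), p ++ t = cs →
    (PySem.List.enumerate t (p.length : Int)).foldl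
      (fun st ic =>
        let k : Int := (ic.2.toNat : Int) - 97
        let occ := PySem.List.pySetD st.1 k (PySem.List.pyGetD st.1 k 0 + 1)
        let pp := PySem.List.pyGetD st.2 k ((0 : Int), (0 : Int))
        (occ, PySem.List.pySetD st.2 k (min ic.1 pp.1, max ic.1 pp.2)))
      ((List.range 26).map (fun k => pvCnt p k),
       (List.range 26).map (fun k => (pvFs nn p k, pvL p k)))
    = ((List.range 26).map (fun k => pvCnt cs k),
       (List.range 26).map (fun k => (pvFs nn cs k, pvL cs k))) := by
  intro t
  induction t with
  | nil =>
    intro p hpt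
    rw [List.append_nil] at hpt
    subst hpt
    simp [PySem.List.enumerate]
  | cons c t ih =>
    intro p hpt
    have hc : c ∈ cs := by rw [← hpt]; simp
    have hOKc : pvOK c := hOK c hc
    have hilt : pvIdx c < 26 := pvIdx_lt c hOKc
    have hplen : p.length < cs.length := by
      have hleq := congrArg List.length hpt
      rw [← hleq]
      have : (p ++ c :: t).length = p.length + t.length + 1 := by
        simp only [List.length_append, List.length_cons]
        omega
      omega
    rw [PySem.List.enumerate_cons, List.foldl_cons]
    have key := ih (p ++ [c]) (by simpa using hpt)
    rw [show (((p ++ [c]).length : Nat) : Int) = (p.length : Int) + 1 by simp] at key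
    rw [← key]
    congr 1
    · simp only
      rw [pvGet_resolve _ _ _ (by simp) hOKc, pvSet_resolve _ _ _ (by simp) hOKc,
          pvGet_resolve _ _ _ (by simp) hOKc, pvSet_resolve _ _ _ (by simp) hOKc,
          getD_map_range' _ _ _ _ hilt, getD_map_range' _ _ _ _ hilt,
          set_map_range _ _ _ _ hilt, set_map_range _ _ _ _ hilt]
      refine congrArg₂ Prod.mk ?_ ?_
      · apply List.map_congr_left
        intro k hk
        rw [List.mem_range] at hk
        by_cases hke : k = pvIdx c
        · subst hke
          rw [if_pos rfl, pvCnt_snoc, if_pos rfl]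
        · rw [if_neg hke, pvCnt_snoc, if_neg (by omega)]
          ring
      · apply List.map_congr_left
        intro k hk
        rw [List.mem_range] at hk
        dsimp only
        by_cases hke : k = pvIdx c
        · subst hke
          rw [if_pos rfl, pvFs_snoc_self _ _ _ (by omega), pvL_snoc_self]
          have := pvL_le_self p (pvIdx c)
          congr 1
          omega
        · rw [if_neg hke, pvFs_snoc_ne _ _ _ (fun h => hke h.symm), pvL_snoc_ne _ _ (fun h => hke h.symm)]


lemma passB (cs : List Char) (hOK : ∀ c ∈ cs, pvOK c) :
    ∀ (t p : List Char), p ++ t = cs →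
    (PySem.List.enumerate t (p.length : Int)).foldl
      (fun st ic =>
        let k : Int := (ic.2.toNat : Int) - 97
        ((if PySem.List.pyGetD st.1 k 0 = (cs.length : Int) then PySem.List.pySetD st.1 k ic.1 else st.1),
         PySem.List.pySetD st.2 k ic.1))
      ((List.range 26).map (fun k => pvFs (cs.length : Int) p k),
       (List.range 26).map (fun k => pvL p k))
    = ((List.range 26).map (fun k => pvFs (cs.length : Int) cs k),
       (List.range 26).map (fun k => pvL cs k)) := by
  intro t
  induction t with
  | nil =>
    intro p hpt
    rw [List.append_nil] at hpt
    subst hpt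
    simp [PySem.List.enumerate]
  | cons c t ih =>
    intro p hpt
    have hc : c ∈ cs := by rw [← hpt]; simp
    have hOKc : pvOK c := hOK c hc
    have hilt : pvIdx c < 26 := pvIdx_lt c hOKc
    have hplen : p.length < cs.length := by
      have hleq := congrArg List.length hpt
      rw [← hleq]
      simp only [List.length_append, List.length_cons]
      omega
    rw [PySem.List.enumerate_cons, List.foldl_cons]
    have key := ih (p ++ [c]) (by simpa using hpt)
    rw [show (((p ++ [c]).length : Nat) : Int) = (p.length : Int) + 1 by simp] at key
    rw [← key]
    congr 1
    simp only
    rw [pvGet_resolve _ _ _ (by simp) hOKc, getD_map_range' _ _ _ _ hilt]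
    refine congrArg₂ Prod.mk ?_ ?_
    · by_cases hfound : p.findIdx (pvP (pvIdx c)) < p.length
      · rw [if_neg (by
          unfold pvFs
          rw [if_pos hfound]
          unfold pvF
          intro he
          omega)]
        apply List.map_congr_left
        intro k hk
        rw [List.mem_range] at hk
        by_cases hke : k = pvIdx c
        · subst hke
          rw [pvFs_snoc_self _ _ _ (by omega)]
          unfold pvFs
          rw [if_pos hfound]
          unfold pvF
          have : (p.findIdx (pvP (pvIdx c)) : Int) < (p.length : Int) := by exact_mod_cast hfound
          omega
        · rw [pvFs_snoc_ne _ _ _ (fun h => hke h.symm)]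
      · rw [if_pos (by unfold pvFs; rw [if_neg hfound])]
        rw [pvSet_resolve _ _ _ (by simp) hOKc, set_map_range _ _ _ _ hilt]
        apply List.map_congr_left
        intro k hk
        rw [List.mem_range] at hk
        by_cases hke : k = pvIdx c
        · subst hke
          rw [if_pos rfl, pvFs_snoc_self _ _ _ (by omega)]
          unfold pvFs
          rw [if_neg hfound]
          omega
        · rw [if_neg hke, pvFs_snoc_ne _ _ _ (fun h => hke h.symm)]
    · rw [pvSet_resolve _ _ _ (by simp) hOKc, set_map_range _ _ _ _ hilt]
      apply List.map_congr_left
      intro k hk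
      rw [List.mem_range] at hk
      by_cases hke : k = pvIdx c
      · subst hke
        rw [if_pos rfl, pvL_snoc_self]
      · rw [if_neg hke, pvL_snoc_ne _ _ (fun h => hke h.symm)]

def pvRow (cs : List Char) (m : Nat) : List Int := (List.range 26).map (fun k => pvCnt (cs.drop m) k)

lemma pvCnt_drop_succ (cs : List Char) (k : Nat) {m : Nat} (hm : m < cs.length) :
    pvCnt (cs.drop m) k = pvCnt (cs.drop (m+1)) k + (if pvIdx (cs[m]'hm) = k then 1 else 0) := by
  unfold pvCnt
  rw [List.drop_eq_getElem_cons hm, List.countP_cons]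
  by_cases h : pvIdx (cs[m]'hm) = k <;> simp [pvP, h] <;> push_cast <;> ring

lemma prefixesA (cs : List Char) (hOK : ∀ c ∈ cs, pvOK c) :
    ∀ (t p : List Char), p ++ t = cs →
    t.foldl (fun pr c =>
        let row := PySem.List.pyGetD pr (-1) ([] : List Int)
        pr ++ [PySem.List.pySetD row ((c.toNat : Int) - 97)
                 (PySem.List.pyGetD row ((c.toNat : Int) - 97) 0 - 1)])
      ((List.range (p.length + 1)).map (fun m => pvRow cs m))
    = (List.range (cs.length + 1)).map (fun m => pvRow cs m) := by
  intro t
  induction t with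
  | nil =>
    intro p hpt
    rw [List.append_nil] at hpt
    subst hpt
    simp
  | cons c t ih =>
    intro p hpt
    have hc : c ∈ cs := by rw [← hpt]; simp
    have hOKc : pvOK c := hOK c hc
    have hilt : pvIdx c < 26 := pvIdx_lt c hOKc
    have hplen : p.length < cs.length := by
      have hleq := congrArg List.length hpt
      rw [← hleq]
      simp only [List.length_append, List.length_cons]
      omega
    have hcs : cs[p.length]'hplen = c := by
      subst hpt
      simp [List.getElem_append_right (Nat.le_refl p.length)]
    rw [List.foldl_cons]
    have key := ih (p ++ [c]) (by simpa using hpt)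
    rw [show (p ++ [c]).length + 1 = p.length + 1 + 1 by simp] at key
    rw [← key]
    congr 1
    simp only
    have hlast : PySem.List.pyGetD ((List.range (p.length + 1)).map (fun m => pvRow cs m)) (-1) ([] : List Int) = pvRow cs p.length := by
      rw [List.range_succ, List.map_append, List.map_singleton, PySem.List.pyGetD_neg_one_append_singleton]
    rw [hlast]
    rw [show List.range (p.length + 1 + 1) = List.range (p.length + 1) ++ [p.length + 1] from List.range_succ]
    rw [List.map_append, List.map_singleton]
    congr 1
    congr 1
    unfold pvRow
    rw [pvGet_resolve _ _ _ (by simp) hOKc, pvSet_resolve _ _ _ (by simp) hOKc,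
      getD_map_range' _ _ _ _ hilt, set_map_range _ _ _ _ hilt]
    apply List.map_congr_left
    intro k hk
    rw [List.mem_range] at hk
    by_cases hke : k = pvIdx c
    · subst hke
      rw [if_pos rfl, pvCnt_drop_succ cs (pvIdx c) hplen, hcs, if_pos rfl]
      ring
    · rw [if_neg hke, pvCnt_drop_succ cs k hplen, hcs, if_neg (fun h => hke h.symm)]
      ring


lemma aCheck_iff (start stop row0 : List Int) (ks : List Int) :
    ((aDiffs start stop ks).2 = false ∧
     (aDiffs start stop ks).1.any
       (fun k => decide (PySem.List.pyGetD start k 0 ≠ PySem.List.pyGetD row0 k 0)) = false)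
    ↔ ∀ k ∈ ks, PySem.List.pyGetD start k 0 = PySem.List.pyGetD stop k 0 ∨
        (PySem.List.pyGetD stop k 0 = 0 ∧ PySem.List.pyGetD start k 0 = PySem.List.pyGetD row0 k 0) := by
  induction ks with
  | nil => simp [aDiffs]
  | cons k ks ih =>
    by_cases h1 : PySem.List.pyGetD start k 0 = PySem.List.pyGetD stop k 0
    · rw [show aDiffs start stop (k :: ks) = aDiffs start stop ks by
        simp only [aDiffs]; rw [if_neg (by simpa using h1)]]
      rw [ih]
      constructor
      · intro hall k' hk'
        rcases List.mem_cons.mp hk' with he | hm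
        · subst he; exact Or.inl h1
        · exact hall k' hm
      · intro hall k' hk'
        exact hall k' (List.mem_cons_of_mem _ hk')
    · by_cases h2 : PySem.List.pyGetD stop k 0 = 0
      · rw [show aDiffs start stop (k :: ks) =
            ((k :: (aDiffs start stop ks).1), (aDiffs start stop ks).2) by
          simp only [aDiffs]; rw [if_pos (by simpa using h1), if_neg (by simpa using h2)]]
        simp only [List.any_cons, Bool.or_eq_false_iff]
        constructor
        · rintro ⟨hb, hd, hrest⟩
          intro k' hk'
          rcases List.mem_cons.mp hk' with he | hm
          · subst he
            right
            exact ⟨h2, by simpa using hd⟩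
          · exact (ih.mp ⟨hb, hrest⟩) k' hm
        · intro hall
          have hk := (hall k (List.mem_cons_self)).resolve_left h1
          have hrest := ih.mpr (fun k' hm => hall k' (List.mem_cons_of_mem _ hm))
          exact ⟨hrest.1, by simpa using hk.2, hrest.2⟩
      · rw [show aDiffs start stop (k :: ks) = ([], true) by
          simp only [aDiffs]; rw [if_pos (by simpa using h1), if_pos (by simpa using h2)]]
        simp only [Bool.true_eq_false, false_and, false_iff]
        intro hall
        have := (hall k List.mem_cons_self).resolve_left h1
        exact h2 this.1

lemma crux (cs : List Char) (hOK : ∀ c ∈ cs, pvOK c) (l h : Int)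
    (hl : 0 ≤ l) (hlh : l ≤ h) (hh : h < (cs.length : Int)) :
    (∀ k : Nat, k < 26 →
       (pvCnt (cs.drop l.toNat) k = pvCnt (cs.drop (h+1).toNat) k ∨
        (pvCnt (cs.drop (h+1).toNat) k = 0 ∧ pvCnt (cs.drop l.toNat) k = pvCnt cs k)))
    ↔ (∀ j : Nat, (hj : j < cs.length) → l ≤ (j : Int) → (j : Int) ≤ h →
         l ≤ pvF cs (pvIdx (cs[j]'hj)) ∧ pvL cs (pvIdx (cs[j]'hj)) ≤ h) := by
  constructor
  · intro hA j hj hjl hjh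
    have hk26 : pvIdx (cs[j]'hj) < 26 := pvIdx_lt _ (hOK _ (List.getElem_mem hj))
    have hne : pvCnt (cs.drop l.toNat) (pvIdx (cs[j]'hj)) ≠ pvCnt (cs.drop (h+1).toNat) (pvIdx (cs[j]'hj)) := by
      rw [pvCnt_ne_iff cs _ (by omega : l.toNat ≤ (h+1).toNat) (by omega : (h+1).toNat ≤ cs.length)]
      exact ⟨j, by omega, by omega, hj, rfl⟩
    have h2 := (hA _ hk26).resolve_left hne
    constructor
    · have htot := h2.2
      rw [pvCnt_total_iff cs _ (by omega : l.toNat ≤ cs.length)] at htot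
      by_contra hcon
      have hfound : cs.findIdx (pvP (pvIdx (cs[j]'hj))) < cs.length := by
        unfold pvF at hcon
        omega
      have hcl := pvF_found hfound
      refine htot _ hfound ?_ hcl
      unfold pvF at hcon
      omega
    · have hz := h2.1
      rw [pvCnt_zero_iff] at hz
      by_contra hcon
      have hfound : cs.reverse.findIdx (pvP (pvIdx (cs[j]'hj))) < cs.length := by
        by_contra hnf
        have := pvL_neg_of_notfound hnf
        omega
      obtain ⟨h0, hlt, hclass⟩ := pvL_found hfound
      exact hz (pvL cs (pvIdx (cs[j]'hj))).toNat (by omega) (by omega) hclass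
  · intro hB k hk26
    by_cases hne : pvCnt (cs.drop l.toNat) k = pvCnt (cs.drop (h+1).toNat) k
    · exact Or.inl hne
    right
    obtain ⟨j, hjl, hjb, hj, hclass⟩ :=
      (pvCnt_ne_iff cs k (by omega : l.toNat ≤ (h+1).toNat) (by omega : (h+1).toNat ≤ cs.length)).mp hne
    obtain ⟨hF, hL⟩ := hB j hj (by omega) (by omega)
    rw [hclass] at hF hL
    constructor
    · rw [pvCnt_zero_iff]
      intro j2 hj2 hge hcl
      have := pvL_ge hj2 hcl
      omega
    · rw [pvCnt_total_iff cs _ (by omega : l.toNat ≤ cs.length)]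
      intro j3 hj3 hlt3 hcl
      have := pvF_le hj3 hcl
      omega



lemma getI_map_range {α : Type} (nn : Nat) (f : Nat → α) (d : α) (i : Int) (h0 : 0 ≤ i)
    (h : i.toNat < nn) : PySem.List.pyGetD ((List.range nn).map f) i d = f i.toNat := by
  rw [PySem.List.pyGetD_eq_getElem _ d h0 (by simp; omega)]
  simp

lemma init_cnt : (List.range 26).map (fun k => pvCnt ([] : List Char) k) = List.replicate 26 (0 : Int) := by
  rw [show (fun k => pvCnt ([] : List Char) k) = (fun _ : Nat => (0 : Int)) from
    funext (fun k => by unfold pvCnt; simp), map_range_const]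

lemma pvFs_nil (nn : Int) (k : Nat) : pvFs nn [] k = nn := by unfold pvFs; simp

lemma pvL_nil (k : Nat) : pvL [] k = -1 := by unfold pvL; simp

lemma init_pos (nn : Int) :
    (List.range 26).map (fun k => (pvFs nn [] k, pvL [] k)) = List.replicate 26 ((nn, -1) : Int × Int) := by
  rw [show (fun k => (pvFs nn [] k, pvL [] k)) = (fun _ : Nat => ((nn, -1) : Int × Int)) from
    funext (fun k => by rw [pvFs_nil, pvL_nil]), map_range_const]

lemma init_first (nn : Int) : (List.range 26).map (fun k => pvFs nn [] k) = List.replicate 26 nn := by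
  rw [show (fun k => pvFs nn [] k) = (fun _ : Nat => nn) from funext (fun k => pvFs_nil nn k), map_range_const]

lemma init_last : (List.range 26).map (fun k => pvL [] k) = List.replicate 26 (-1 : Int) := by
  rw [show (fun k => pvL [] k) = (fun _ : Nat => (-1 : Int)) from funext (fun k => pvL_nil k), map_range_const]

lemma pvRow_zero (cs : List Char) : pvRow cs 0 = (List.range 26).map (fun k => pvCnt cs k) := by
  unfold pvRow; rw [List.drop_zero]


lemma bElem_eq (cs : List Char) (hOK : ∀ c ∈ cs, pvOK c) (x l h : Int) (hx0 : 0 ≤ x)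
    (hx : x < (cs.length : Int)) :
    ((decide (l ≤ PySem.List.pyGetD ((List.range 26).map (pvF cs))
        (((PySem.List.pyGetD cs x ' ').toNat : Int) - 97) 0)
      && decide (PySem.List.pyGetD ((List.range 26).map (fun k => pvL cs k))
        (((PySem.List.pyGetD cs x ' ').toNat : Int) - 97) 0 ≤ h)) = true)
    ↔ (l ≤ pvF cs (pvIdx (cs[x.toNat]'(by omega))) ∧ pvL cs (pvIdx (cs[x.toNat]'(by omega))) ≤ h) := by
  have hxl : x.toNat < cs.length := by omega
  have hc : cs[x.toNat]'hxl ∈ cs := List.getElem_mem hxl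
  rw [PySem.List.pyGetD_eq_getElem _ _ hx0 (by omega)]
  rw [pvGet_resolve _ _ _ (by simp) (hOK _ hc), pvGet_resolve _ _ _ (by simp) (hOK _ hc)]
  rw [getD_map_range' _ _ _ _ (pvIdx_lt _ (hOK _ hc)), getD_map_range' _ _ _ _ (pvIdx_lt _ (hOK _ hc))]
  simp

-- ===== VERDICT (by name: the statement is the Claim_ definition above) =====
theorem maxSubstringLength_spec : Claim_equal_maxSubstringLength := by
  intro s hdom hpre
  unfold Spec_maxSubstringLength
  have hOK : ∀ c ∈ s.toList, pvOK c := by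
    intro c hc
    have hx := List.all_eq_true.mp hpre c hc
    simp only [Bool.and_eq_true, decide_eq_true_eq] at hx
    exact hx
  have hA := passA s.toList hOK (s.toList.length : Int) le_rfl s.toList [] (List.nil_append _)
  have hPre := prefixesA s.toList hOK s.toList [] (List.nil_append _)
  have hB := passB s.toList hOK s.toList [] (List.nil_append _)
  simp only [List.length_nil, Nat.cast_zero, Nat.zero_add] at hA hPre hB
  rw [init_cnt, init_pos] at hA
  rw [init_first, init_last] at hB
  rw [List.map_congr_left (fun k _ => by rw [pvFs_full] :
    ∀ k ∈ List.range 26, (pvFs ((s.toList.length : Nat) : Int) s.toList k, pvL s.toList k)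
      = (pvF s.toList k, pvL s.toList k))] at hA
  rw [List.map_congr_left (fun k _ => by rw [pvFs_full] :
    ∀ k ∈ List.range 26, pvFs ((s.toList.length : Nat) : Int) s.toList k = pvF s.toList k)] at hB
  rw [show (List.range (0 + 1)).map (fun m => pvRow s.toList m)
      = [(List.range 26).map (fun k => pvCnt s.toList k)] by
    simp only [Nat.zero_add, List.range_one, List.map_cons, List.map_nil, pvRow_zero]] at hPre
  simp only [maxSubstringLength, maxSubstringLength_alt]
  rw [hA, hPre, hB]
  refine PySem.List.foldl_congr_mem _ _ _ _ ?_
  intro ans i hi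
  refine PySem.List.foldl_congr_mem _ _ _ _ ?_
  intro ans2 j hj
  obtain ⟨hi0, hi26⟩ := PySem.List.mem_pyRange_one.mp hi
  obtain ⟨hj0, hj26⟩ := PySem.List.mem_pyRange_one.mp hj
  rw [getI_map_range 26 _ _ i hi0 (by omega), getI_map_range 26 _ _ j hj0 (by omega),
      getI_map_range 26 _ _ i hi0 (by omega), getI_map_range 26 _ _ j hj0 (by omega)]
  dsimp only
  have hl0 : 0 ≤ pvF s.toList i.toNat := pvF_nonneg _ _
  have hhn : pvL s.toList j.toNat < (s.toList.length : Int) := pvL_lt_length _ _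
  by_cases hgt : pvF s.toList i.toNat > pvL s.toList j.toNat
  · rw [if_pos hgt, if_pos (Or.inl hgt)]
  rw [if_neg hgt]
  by_cases hw : pvF s.toList i.toNat = 0 ∧ pvL s.toList j.toNat = (s.toList.length : Int) - 1
  · rw [if_pos hw, if_pos (Or.inr hw)]
  rw [if_neg hw, if_neg (by tauto : ¬(pvF s.toList i.toNat > pvL s.toList j.toNat ∨
      (pvF s.toList i.toNat = 0 ∧ pvL s.toList j.toNat = (s.toList.length : Int) - 1)))]
  have hlh : pvF s.toList i.toNat ≤ pvL s.toList j.toNat := by omega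
  rw [getI_map_range (s.toList.length + 1) _ _ _ hl0 (by omega),
      getI_map_range (s.toList.length + 1) _ _ _ (by omega : (0:Int) ≤ pvL s.toList j.toNat + 1) (by omega),
      getI_map_range (s.toList.length + 1) _ _ 0 le_rfl (by simp)]
  set l := pvF s.toList i.toNat with hldef
  set h := pvL s.toList j.toNat with hhdef
  simp only [Int.toNat_zero]
  have hiffB : ((PySem.List.pyRange l (h + 1)).all (fun x =>
      decide (l ≤ PySem.List.pyGetD ((List.range 26).map (pvF s.toList))
        (((PySem.List.pyGetD s.toList x ' ').toNat : Int) - 97) 0)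
      && decide (PySem.List.pyGetD ((List.range 26).map (fun k => pvL s.toList k))
        (((PySem.List.pyGetD s.toList x ' ').toNat : Int) - 97) 0 ≤ h)) = true)
      ↔ (∀ j' : Nat, (hj' : j' < s.toList.length) → l ≤ (j' : Int) → (j' : Int) ≤ h →
          l ≤ pvF s.toList (pvIdx (s.toList[j']'hj')) ∧ pvL s.toList (pvIdx (s.toList[j']'hj')) ≤ h) := by
    rw [List.all_eq_true]
    constructor
    · intro hall j' hj' h1 h2
      have hb := hall (j' : Int) (PySem.List.mem_pyRange_one.mpr ⟨h1, by omega⟩)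
      rw [bElem_eq s.toList hOK _ l h (by omega) (by omega)] at hb
      simpa using hb
    · intro hall x hx
      obtain ⟨hx1, hx2⟩ := PySem.List.mem_pyRange_one.mp hx
      rw [bElem_eq s.toList hOK x l h (by omega) (by omega)]
      exact hall x.toNat (by omega) (by omega) (by omega)
  have hiffA : (∀ k ∈ PySem.List.pyRange 0 26 1,
        PySem.List.pyGetD (pvRow s.toList l.toNat) k 0 = PySem.List.pyGetD (pvRow s.toList (h + 1).toNat) k 0 ∨
        (PySem.List.pyGetD (pvRow s.toList (h + 1).toNat) k 0 = 0 ∧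
         PySem.List.pyGetD (pvRow s.toList l.toNat) k 0 = PySem.List.pyGetD (pvRow s.toList 0) k 0))
      ↔ (∀ kk : Nat, kk < 26 →
          (pvCnt (s.toList.drop l.toNat) kk = pvCnt (s.toList.drop (h + 1).toNat) kk ∨
           (pvCnt (s.toList.drop (h + 1).toNat) kk = 0 ∧
            pvCnt (s.toList.drop l.toNat) kk = pvCnt s.toList kk))) := by
    constructor
    · intro hall kk hkk
      have hv := hall (kk : Int) (PySem.List.mem_pyRange_one.mpr ⟨by omega, by omega⟩)
      unfold pvRow at hv
      rw [getI_map_range 26 _ _ _ (by omega) (by simp; omega),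
          getI_map_range 26 _ _ _ (by omega) (by simp; omega),
          getI_map_range 26 _ _ _ (by omega) (by simp; omega)] at hv
      simpa [List.drop_zero] using hv
    · intro hall k hk
      obtain ⟨hk0, hk26⟩ := PySem.List.mem_pyRange_one.mp hk
      unfold pvRow
      rw [getI_map_range 26 _ _ _ (by omega) (by omega),
          getI_map_range 26 _ _ _ (by omega) (by omega),
          getI_map_range 26 _ _ _ (by omega) (by omega)]
      have hv := hall k.toNat (by omega)
      simpa [List.drop_zero] using hv
  have hiff := hiffB.trans ((crux s.toList hOK l h hl0 hlh hhn).symm.trans hiffA.symm)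
  by_cases hacc : ∀ k ∈ PySem.List.pyRange 0 26 1,
      PySem.List.pyGetD (pvRow s.toList l.toNat) k 0 = PySem.List.pyGetD (pvRow s.toList (h + 1).toNat) k 0 ∨
      (PySem.List.pyGetD (pvRow s.toList (h + 1).toNat) k 0 = 0 ∧
       PySem.List.pyGetD (pvRow s.toList l.toNat) k 0 = PySem.List.pyGetD (pvRow s.toList 0) k 0)
  · obtain ⟨hdb, hany⟩ := (aCheck_iff (pvRow s.toList l.toNat) (pvRow s.toList (h + 1).toNat)
      (pvRow s.toList 0) (PySem.List.pyRange 0 26 1)).mpr hacc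
    rw [if_pos (hiff.mpr hacc)]
    simp only [hdb]
    rw [if_neg (by simp)]
    split
    · rename_i hcontra
      exact absurd (hany.symm.trans hcontra) Bool.false_ne_true
    · rfl
  · rw [if_neg (fun hc => hacc (hiff.mp hc))]
    cases hdb : (aDiffs (pvRow s.toList l.toNat) (pvRow s.toList (h + 1).toNat)
        (PySem.List.pyRange 0 26 1)).2 with
    | true => rw [if_pos rfl]
    | false =>
      cases hany : ((aDiffs (pvRow s.toList l.toNat) (pvRow s.toList (h + 1).toNat)
          (PySem.List.pyRange 0 26 1)).1.any (fun k =>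
            decide (PySem.List.pyGetD (pvRow s.toList l.toNat) k 0 ≠
              PySem.List.pyGetD (pvRow s.toList 0) k 0))) with
      | false => exact absurd ((aCheck_iff _ _ _ _).mp ⟨hdb, hany⟩) hacc
      | true =>
        rw [if_neg (by simp)]
        split
        · rfl
        · rename_i hcontra
          exact absurd hany hcontra
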